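-- pv_equiv track=rewrite | github.com/Julz0711/cardmarket | backend/scrapers/steam_inventory_scraper.py | _extract_cs2_rarity
-- ===== SOURCE A (Python) =====
-- from typing import List, Dict, Any, Optional
--
-- def _extract_cs2_rarity(item_data: Dict) -> str:
--     """Extract CS2 item rarity (Contraband, Covert, etc.)"""
--     tags = item_data.get('tags', [])
--
--     # Look for rarity tag first
--     for tag in tags:
--         if tag.get('category') == 'Rarity':
--             rarity_name = tag.get('localized_tag_name', 'Unknown')
--             rarity_internal = tag.get('internal_name', '').lower()
--
--             # Standard weapon/item rarity mapping
--             rarity_mapping = {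
--                 'contraband': 'Contraband',
--                 'covert': 'Covert',
--                 'classified': 'Classified',
--                 'restricted': 'Restricted',
--                 'mil-spec': 'Mil-Spec',
--                 'milspec': 'Mil-Spec',
--                 'industrial': 'Industrial',
--                 'consumer': 'Consumer',
--                 # Gloves and knives
--                 'extraordinary': 'Extraordinary',
--                 # Agent rarities (CS2 specific)
--                 'master': 'Master Agent',
--                 'superior': 'Superior Agent',
--                 'distinguished': 'Distinguished Agent',
--                 'exceptional': 'Exceptional Agent',
--                 # Other special rarities
--                 'industrial grade': 'Industrial Grade',
--                 'rare': 'Industrial Grade',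
--                 'uncommon': 'Uncommon',
--                 'common': 'Common',
--                 'legendary': 'Legendary',
--                 'mythical': 'Mythical',
--                 'immortal': 'Immortal',
--                 'arcana': 'Arcana'
--             }
--
--             for key, value in rarity_mapping.items():
--                 if key in rarity_internal or key in rarity_name.lower():
--                     return value
--
--             return rarity_name
--
--     # Look for quality tag as fallback
--     for tag in tags:
--         if tag.get('category') == 'Quality':
--             quality_name = tag.get('localized_tag_name', 'Unknown')
--             quality_internal = tag.get('internal_name', '').lower()
--
--             quality_mapping = {
--                 'normal': 'Normal',
--                 'genuine': 'Genuine',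
--                 'vintage': 'Vintage',
--                 'unusual': 'Unusual',
--                 'unique': 'Unique',
--                 'strange': 'Strange',
--                 'haunted': 'Haunted',
--                 'collectors': 'Collector\'s',
--                 'decorated': 'Decorated'
--             }
--
--             for key, value in quality_mapping.items():
--                 if key in quality_internal or key in quality_name.lower():
--                     return value
--
--             return quality_name
--
--     return 'Unknown'
-- ===== SOURCE B (Python) =====
-- RARITY_MAPPING = [
--     ('contraband', 'Contraband'),
--     ('covert', 'Covert'),
--     ('classified', 'Classified'),
--     ('restricted', 'Restricted'),
--     ('mil-spec', 'Mil-Spec'),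
--     ('milspec', 'Mil-Spec'),
--     ('industrial', 'Industrial'),
--     ('consumer', 'Consumer'),
--     ('extraordinary', 'Extraordinary'),
--     ('master', 'Master Agent'),
--     ('superior', 'Superior Agent'),
--     ('distinguished', 'Distinguished Agent'),
--     ('exceptional', 'Exceptional Agent'),
--     ('industrial grade', 'Industrial Grade'),
--     ('rare', 'Industrial Grade'),
--     ('uncommon', 'Uncommon'),
--     ('common', 'Common'),
--     ('legendary', 'Legendary'),
--     ('mythical', 'Mythical'),
--     ('immortal', 'Immortal'),
--     ('arcana', 'Arcana'),
-- ]
--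
-- QUALITY_MAPPING = [
--     ('normal', 'Normal'),
--     ('genuine', 'Genuine'),
--     ('vintage', 'Vintage'),
--     ('unusual', 'Unusual'),
--     ('unique', 'Unique'),
--     ('strange', 'Strange'),
--     ('haunted', 'Haunted'),
--     ('collectors', "Collector's"),
--     ('decorated', 'Decorated'),
-- ]
--
--
-- def _resolve(tag, mapping):
--     """Resolve a tag against a (key, value) mapping list; fall back to its raw name."""
--     name = tag.get('localized_tag_name', 'Unknown')
--     internal = tag.get('internal_name', '').lower()
--     name_lower = name.lower()
--     for key, value in mapping:
--         if key in internal or key in name_lower: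
--             return value
--     return name
--
--
-- def _extract_cs2_rarity(item_data):
--     """Extract CS2 item rarity (Contraband, Covert, etc.) — single pass over tags."""
--     quality_tag = None
--     for tag in item_data.get('tags', []):
--         if tag.get('category') == 'Rarity':
--             return _resolve(tag, RARITY_MAPPING)
--         if quality_tag is None and tag.get('category') == 'Quality':
--             quality_tag = tag
--     if quality_tag is not None:
--         return _resolve(quality_tag, QUALITY_MAPPING)
--     return 'Unknown'
-- ===== Notes on version B (the rewrite author's own statement) =====
-- stated objective: simpler
-- what changed: A's two sequential scans over tags (rarity pass, then quality pass) are fused into a single pass that remembers the first Quality tag and returns on the first Rarity tag, and A's two duplicated inline mapping loops are factored into one shared resolver parameterised by the mapping list.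
import Mathlib
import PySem

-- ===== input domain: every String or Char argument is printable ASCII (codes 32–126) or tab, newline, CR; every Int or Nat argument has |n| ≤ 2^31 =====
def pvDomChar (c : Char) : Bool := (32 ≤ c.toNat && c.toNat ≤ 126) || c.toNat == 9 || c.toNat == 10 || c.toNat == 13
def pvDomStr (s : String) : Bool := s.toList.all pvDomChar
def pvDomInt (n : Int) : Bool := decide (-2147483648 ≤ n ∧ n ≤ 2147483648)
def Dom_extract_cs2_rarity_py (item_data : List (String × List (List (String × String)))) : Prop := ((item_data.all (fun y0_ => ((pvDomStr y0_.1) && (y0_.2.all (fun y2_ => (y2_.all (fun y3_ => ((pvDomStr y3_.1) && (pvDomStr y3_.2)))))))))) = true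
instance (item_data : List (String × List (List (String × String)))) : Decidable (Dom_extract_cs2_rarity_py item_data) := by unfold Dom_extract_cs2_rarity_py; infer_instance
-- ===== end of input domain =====

-- B fuses A's two scans over tags into one pass (remembering the first Quality tag) and
-- factors A's two duplicated mapping loops into one shared resolver; objective: simpler.


-- the two literal mappings (shared data constants, in A's insertion order)
def pvRarityMap : List (String × String) :=
  [("contraband", "Contraband"), ("covert", "Covert"), ("classified", "Classified"),
   ("restricted", "Restricted"), ("mil-spec", "Mil-Spec"), ("milspec", "Mil-Spec"),
   ("industrial", "Industrial"), ("consumer", "Consumer"), ("extraordinary", "Extraordinary"),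
   ("master", "Master Agent"), ("superior", "Superior Agent"),
   ("distinguished", "Distinguished Agent"), ("exceptional", "Exceptional Agent"),
   ("industrial grade", "Industrial Grade"), ("rare", "Industrial Grade"),
   ("uncommon", "Uncommon"), ("common", "Common"), ("legendary", "Legendary"),
   ("mythical", "Mythical"), ("immortal", "Immortal"), ("arcana", "Arcana")]

def pvQualityMap : List (String × String) :=
  [("normal", "Normal"), ("genuine", "Genuine"), ("vintage", "Vintage"),
   ("unusual", "Unusual"), ("unique", "Unique"), ("strange", "Strange"),
   ("haunted", "Haunted"), ("collectors", "Collector's"), ("decorated", "Decorated")]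

-- ===== PORT A =====
-- A's inner 'for key, value in mapping: if key in internal or key in name.lower(): return value'
def pvMapScanA (m : List (String × String)) (internal nameLower : String) : Option String :=
  match m with
  | [] => none
  | (k, v) :: rest =>
    if PySem.Str.isIn k internal || PySem.Str.isIn k nameLower then some v
    else pvMapScanA rest internal nameLower

-- A's first loop: find the first 'Rarity' tag and return its mapped rarity (early return)
def pvLoopRarityA (tags : List (List (String × String))) : Option String :=
  match tags with
  | [] => none
  | tag :: rest =>
    if (PySem.Dict.mk tag).get? "category" = some "Rarity" then
      let name := (PySem.Dict.mk tag).getD "localized_tag_name" "Unknown"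
      let internal := PySem.Str.lower ((PySem.Dict.mk tag).getD "internal_name" "")
      some (match pvMapScanA pvRarityMap internal (PySem.Str.lower name) with
            | some v => v
            | none => name)
    else pvLoopRarityA rest

-- A's second loop: find the first 'Quality' tag and return its mapped quality (early return)
def pvLoopQualityA (tags : List (List (String × String))) : Option String :=
  match tags with
  | [] => none
  | tag :: rest =>
    if (PySem.Dict.mk tag).get? "category" = some "Quality" then
      let name := (PySem.Dict.mk tag).getD "localized_tag_name" "Unknown"
      let internal := PySem.Str.lower ((PySem.Dict.mk tag).getD "internal_name" "")
      some (match pvMapScanA pvQualityMap internal (PySem.Str.lower name) with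
            | some v => v
            | none => name)
    else pvLoopQualityA rest

def extract_cs2_rarity_py (item_data : List (String × List (List (String × String)))) : String :=
  let tags := (PySem.Dict.mk item_data).getD "tags" []
  match pvLoopRarityA tags with
  | some r => r
  | none =>
    match pvLoopQualityA tags with
    | some r => r
    | none => "Unknown"

-- ===== PORT B =====
-- B's shared resolver: scan the mapping, defaulting to the raw localized name
def pvScanB (m : List (String × String)) (internal nameLower dflt : String) : String :=
  match m with
  | [] => dflt
  | (k, v) :: rest =>
    if PySem.Str.isIn k internal || PySem.Str.isIn k nameLower then v
    else pvScanB rest internal nameLower dflt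

def pvResolveB (tag : List (String × String)) (mapping : List (String × String)) : String :=
  let name := (PySem.Dict.mk tag).getD "localized_tag_name" "Unknown"
  let internal := PySem.Str.lower ((PySem.Dict.mk tag).getD "internal_name" "")
  pvScanB mapping internal (PySem.Str.lower name) name

-- B's single pass: return on the first Rarity tag, remember the first Quality tag
def pvLoopB (tags : List (List (String × String))) (qualityTag : Option (List (String × String))) : String :=
  match tags with
  | [] =>
    match qualityTag with
    | some t => pvResolveB t pvQualityMap
    | none => "Unknown"
  | tag :: rest =>
    if (PySem.Dict.mk tag).get? "category" = some "Rarity" then pvResolveB tag pvRarityMap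
    else if qualityTag = none ∧ (PySem.Dict.mk tag).get? "category" = some "Quality" then
      pvLoopB rest (some tag)
    else pvLoopB rest qualityTag

def extract_cs2_rarity_py_alt (item_data : List (String × List (List (String × String)))) : String :=
  pvLoopB ((PySem.Dict.mk item_data).getD "tags" []) none

-- ===== PRECONDITION & SPEC =====
def Spec_extract_cs2_rarity_py (item_data : List (String × List (List (String × String)))) (out : String) : Prop := out = extract_cs2_rarity_py_alt item_data
instance (item_data : List (String × List (List (String × String)))) (out : String) : Decidable (Spec_extract_cs2_rarity_py item_data out) := by unfold Spec_extract_cs2_rarity_py; infer_instance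

-- ===== CLAIM (what is proved, stated in full; the proofs are below) =====
def Claim_equal_extract_cs2_rarity_py : Prop := ∀ (item_data : List (String × List (List (String × String)))), Dom_extract_cs2_rarity_py item_data → Spec_extract_cs2_rarity_py item_data (extract_cs2_rarity_py item_data)

-- ===== LEMMAS AND PROOFS =====
-- A's option-valued mapping scan with fallback d equals B's default-carrying scan
lemma scanA_eq_scanB (m : List (String × String)) (internal nameLower d : String) :
    (match pvMapScanA m internal nameLower with | some v => v | none => d)
      = pvScanB m internal nameLower d := by
  induction m with
  | nil => rfl
  | cons p rest ih =>
    obtain ⟨k, v⟩ := p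
    simp only [pvMapScanA, pvScanB]
    split_ifs with h <;> simp [ih]

-- the single-pass loop with remembered quality tag q equals A's two-scan structure
lemma loopB_eq (tags : List (List (String × String))) (q : Option (List (String × String))) :
    pvLoopB tags q =
      (match pvLoopRarityA tags with
       | some r => r
       | none =>
         match q with
         | some t => pvResolveB t pvQualityMap
         | none =>
           match pvLoopQualityA tags with
           | some r => r
           | none => "Unknown") := by
  induction tags generalizing q with
  | nil => cases q <;> rfl
  | cons tag rest ih =>
    by_cases hr : (PySem.Dict.mk tag).get? "category" = some "Rarity"
    · simp only [pvLoopB, pvLoopRarityA, hr, if_true]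
      simp only [pvResolveB]
      exact (scanA_eq_scanB _ _ _ _).symm
    · by_cases hq : (PySem.Dict.mk tag).get? "category" = some "Quality"
      · cases q with
        | none =>
          simp only [pvLoopB, pvLoopRarityA, pvLoopQualityA, hq]
          rw [ih]
          simp [pvResolveB, scanA_eq_scanB]
        | some t =>
          simp only [pvLoopB, pvLoopRarityA, hq]
          simpa using ih (some t)
      · simp only [pvLoopB, pvLoopRarityA, pvLoopQualityA, hr, hq]
        simpa using ih q

-- ===== VERDICT (by name: the statement is the Claim_ definition above) =====
theorem extract_cs2_rarity_py_spec : Claim_equal_extract_cs2_rarity_py := by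
  intro item_data _
  unfold Spec_extract_cs2_rarity_py extract_cs2_rarity_py extract_cs2_rarity_py_alt
  rw [loopB_eq]
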